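-- pv_equiv track=rewrite | github.com/Enya-AuthMe/AML | preprocess/ex2/tools.py | find_month_firstday
-- ===== SOURCE A (Python) =====
-- def find_month_firstday(date):
--     mon = 0
--     flag = 0
--     month = [0, 30, 61, 91, 122, 153, 183, 214, 244, 275, 306, 334, 365]
--     month_comp = [0, 30, 61, 91, 122, 153,
--                     183, 214, 244, 275, 306, 334, 365]
--     month_comp.append(date)
--     month_comp.sort()
--
--     for i in range(len(month)):
--         if month[i] != month_comp[i]:
--             mon = month[i-1]
--             flag = 1
--             break
--     if flag == 0:
--         mon = month[len(month)-1]
--     return mon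
-- ===== SOURCE B (Python) =====
-- def find_month_firstday(date):
--     # Binary search (bisect_right by hand) over the fixed boundary list;
--     # a date before the first boundary wraps to the last element exactly as in A.
--     month = [0, 30, 61, 91, 122, 153, 183, 214, 244, 275, 306, 334, 365]
--     lo, hi = 0, len(month)
--     while lo < hi:
--         mid = (lo + hi) // 2
--         if date < month[mid]:
--             hi = mid
--         else:
--             lo = mid + 1
--     return month[lo - 1]
-- ===== Notes on version B (the rewrite author's own statement) =====
-- stated objective: alternative
-- what changed: Replaces A's append+stable-sort+linear mismatch scan with a hand-written bisect_right binary search over the same boundary list, relying on Python's negative-index wraparound for dates before the first boundary.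
import Mathlib
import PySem

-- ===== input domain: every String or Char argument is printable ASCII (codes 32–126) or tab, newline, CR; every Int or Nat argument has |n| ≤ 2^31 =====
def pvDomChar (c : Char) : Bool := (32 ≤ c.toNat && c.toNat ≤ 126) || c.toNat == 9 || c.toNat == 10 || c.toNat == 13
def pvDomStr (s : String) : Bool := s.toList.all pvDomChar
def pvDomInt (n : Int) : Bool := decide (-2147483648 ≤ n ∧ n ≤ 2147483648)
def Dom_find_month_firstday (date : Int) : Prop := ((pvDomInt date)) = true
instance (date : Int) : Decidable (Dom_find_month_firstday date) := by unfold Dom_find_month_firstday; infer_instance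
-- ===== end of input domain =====

-- B replaces A's append+stable-sort+mismatch-scan with a hand-written bisect_right binary search
-- over the same boundary list (alternative algorithm, same result including the negative-index wraparound).

-- ===== PORT A =====
-- for i in range(len(month)): if month[i] != month_comp[i]: return month[i-1] (break); none = no break
def aLoop (month month_comp : List Int) (i : Nat) : Option Int :=
  if i < month.length then
    if month.getD i 0 ≠ month_comp.getD i 0 then
      some ((PySem.List.pyGet? month ((i : Int) - 1)).getD 0)
    else aLoop month month_comp (i + 1)
  else none
termination_by month.length - i
decreasing_by omega

def find_month_firstday (date : Int) : Int :=
  let month : List Int := [0, 30, 61, 91, 122, 153, 183, 214, 244, 275, 306, 334, 365]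
  let month_comp : List Int := PySem.List.sorted (month ++ [date]) (fun x => x) false
  match aLoop month month_comp 0 with
  | some mon => mon
  | none => month.getD (month.length - 1) 0

-- ===== PORT B =====
-- while lo < hi: mid = (lo+hi)//2; if date < month[mid]: hi = mid else: lo = mid+1
def altLoop (date : Int) (month : List Int) (lo hi : Nat) : Nat :=
  if lo < hi then
    let mid := (lo + hi) / 2
    if date < month.getD mid 0 then altLoop date month lo mid
    else altLoop date month (mid + 1) hi
  else lo
termination_by hi - lo
decreasing_by all_goals omega

def find_month_firstday_alt (date : Int) : Int :=
  let month : List Int := [0, 30, 61, 91, 122, 153, 183, 214, 244, 275, 306, 334, 365]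
  let lo := altLoop date month 0 month.length
  (PySem.List.pyGet? month ((lo : Int) - 1)).getD 0

-- ===== PRECONDITION & SPEC =====
def Spec_find_month_firstday (date : Int) (out : Int) : Prop := out = find_month_firstday_alt date
instance (date : Int) (out : Int) : Decidable (Spec_find_month_firstday date out) := by unfold Spec_find_month_firstday; infer_instance

-- ===== CLAIM (what is proved, stated in full; the proofs are below) =====
def Claim_equal_find_month_firstday : Prop := ∀ (date : Int), Dom_find_month_firstday date → Spec_find_month_firstday date (find_month_firstday date)

-- ===== LEMMAS AND PROOFS =====

theorem insert_perm (pre suf : List Int) (d : Int) : (pre ++ d :: suf).Perm ((pre ++ suf) ++ [d]) :=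
  List.perm_middle.trans (List.perm_append_singleton d _).symm

set_option maxHeartbeats 2000000 in
theorem find_month_firstday_main_eq : ∀ (date : Int), find_month_firstday date = find_month_firstday_alt date := by
  intro date
  by_cases h0 : date < 0
  · have hs : PySem.List.sorted (([0, 30, 61, 91, 122, 153, 183, 214, 244, 275, 306, 334, 365] : List Int) ++ [date]) (fun x => x) false = ([date, 0, 30, 61, 91, 122, 153, 183, 214, 244, 275, 306, 334, 365] : List Int) := PySem.List.sorted_id_eq_of_perm_of_pairwise _ _ (insert_perm [] [0, 30, 61, 91, 122, 153, 183, 214, 244, 275, 306, 334, 365] date) (by simp [List.pairwise_cons]; omega)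
    simp only [find_month_firstday, find_month_firstday_alt]
    rw [hs]
    simp [aLoop, altLoop, List.getD, PySem.List.pyGet?, PySem.List.pyIdx?, (show (0:Int) ≠ date from by omega), (show date < 183 from by omega), (show date < 91 from by omega), (show date < 30 from by omega), (show date < 0 from by omega)]
  by_cases h1 : date < 30
  · have hs : PySem.List.sorted (([0, 30, 61, 91, 122, 153, 183, 214, 244, 275, 306, 334, 365] : List Int) ++ [date]) (fun x => x) false = ([0, date, 30, 61, 91, 122, 153, 183, 214, 244, 275, 306, 334, 365] : List Int) := PySem.List.sorted_id_eq_of_perm_of_pairwise _ _ (insert_perm [0] [30, 61, 91, 122, 153, 183, 214, 244, 275, 306, 334, 365] date) (by simp [List.pairwise_cons]; omega)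
    simp only [find_month_firstday, find_month_firstday_alt]
    rw [hs]
    simp [aLoop, altLoop, List.getD, PySem.List.pyGet?, PySem.List.pyIdx?, (show (30:Int) ≠ date from by omega), (show date < 183 from by omega), (show date < 91 from by omega), (show date < 30 from by omega), (show ¬ date < (0:Int) from by omega)]
  by_cases h2 : date < 61
  · have hs : PySem.List.sorted (([0, 30, 61, 91, 122, 153, 183, 214, 244, 275, 306, 334, 365] : List Int) ++ [date]) (fun x => x) false = ([0, 30, date, 61, 91, 122, 153, 183, 214, 244, 275, 306, 334, 365] : List Int) := PySem.List.sorted_id_eq_of_perm_of_pairwise _ _ (insert_perm [0, 30] [61, 91, 122, 153, 183, 214, 244, 275, 306, 334, 365] date) (by simp [List.pairwise_cons]; omega)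
    simp only [find_month_firstday, find_month_firstday_alt]
    rw [hs]
    simp [aLoop, altLoop, List.getD, PySem.List.pyGet?, PySem.List.pyIdx?, (show (61:Int) ≠ date from by omega), (show date < 183 from by omega), (show date < 91 from by omega), (show ¬ date < (30:Int) from by omega), (show date < 61 from by omega)]
  by_cases h3 : date < 91
  · have hs : PySem.List.sorted (([0, 30, 61, 91, 122, 153, 183, 214, 244, 275, 306, 334, 365] : List Int) ++ [date]) (fun x => x) false = ([0, 30, 61, date, 91, 122, 153, 183, 214, 244, 275, 306, 334, 365] : List Int) := PySem.List.sorted_id_eq_of_perm_of_pairwise _ _ (insert_perm [0, 30, 61] [91, 122, 153, 183, 214, 244, 275, 306, 334, 365] date) (by simp [List.pairwise_cons]; omega)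
    simp only [find_month_firstday, find_month_firstday_alt]
    rw [hs]
    simp [aLoop, altLoop, List.getD, PySem.List.pyGet?, PySem.List.pyIdx?, (show (91:Int) ≠ date from by omega), (show date < 183 from by omega), (show date < 91 from by omega), (show ¬ date < (30:Int) from by omega), (show ¬ date < (61:Int) from by omega)]
  by_cases h4 : date < 122
  · have hs : PySem.List.sorted (([0, 30, 61, 91, 122, 153, 183, 214, 244, 275, 306, 334, 365] : List Int) ++ [date]) (fun x => x) false = ([0, 30, 61, 91, date, 122, 153, 183, 214, 244, 275, 306, 334, 365] : List Int) := PySem.List.sorted_id_eq_of_perm_of_pairwise _ _ (insert_perm [0, 30, 61, 91] [122, 153, 183, 214, 244, 275, 306, 334, 365] date) (by simp [List.pairwise_cons]; omega)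
    simp only [find_month_firstday, find_month_firstday_alt]
    rw [hs]
    simp [aLoop, altLoop, List.getD, PySem.List.pyGet?, PySem.List.pyIdx?, (show (122:Int) ≠ date from by omega), (show date < 183 from by omega), (show ¬ date < (91:Int) from by omega), (show date < 153 from by omega), (show date < 122 from by omega)]
  by_cases h5 : date < 153
  · have hs : PySem.List.sorted (([0, 30, 61, 91, 122, 153, 183, 214, 244, 275, 306, 334, 365] : List Int) ++ [date]) (fun x => x) false = ([0, 30, 61, 91, 122, date, 153, 183, 214, 244, 275, 306, 334, 365] : List Int) := PySem.List.sorted_id_eq_of_perm_of_pairwise _ _ (insert_perm [0, 30, 61, 91, 122] [153, 183, 214, 244, 275, 306, 334, 365] date) (by simp [List.pairwise_cons]; omega)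
    simp only [find_month_firstday, find_month_firstday_alt]
    rw [hs]
    simp [aLoop, altLoop, List.getD, PySem.List.pyGet?, PySem.List.pyIdx?, (show (153:Int) ≠ date from by omega), (show date < 183 from by omega), (show ¬ date < (91:Int) from by omega), (show date < 153 from by omega), (show ¬ date < (122:Int) from by omega)]
  by_cases h6 : date < 183
  · have hs : PySem.List.sorted (([0, 30, 61, 91, 122, 153, 183, 214, 244, 275, 306, 334, 365] : List Int) ++ [date]) (fun x => x) false = ([0, 30, 61, 91, 122, 153, date, 183, 214, 244, 275, 306, 334, 365] : List Int) := PySem.List.sorted_id_eq_of_perm_of_pairwise _ _ (insert_perm [0, 30, 61, 91, 122, 153] [183, 214, 244, 275, 306, 334, 365] date) (by simp [List.pairwise_cons]; omega)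
    simp only [find_month_firstday, find_month_firstday_alt]
    rw [hs]
    simp [aLoop, altLoop, List.getD, PySem.List.pyGet?, PySem.List.pyIdx?, (show (183:Int) ≠ date from by omega), (show date < 183 from by omega), (show ¬ date < (91:Int) from by omega), (show ¬ date < (153:Int) from by omega)]
  by_cases h7 : date < 214
  · have hs : PySem.List.sorted (([0, 30, 61, 91, 122, 153, 183, 214, 244, 275, 306, 334, 365] : List Int) ++ [date]) (fun x => x) false = ([0, 30, 61, 91, 122, 153, 183, date, 214, 244, 275, 306, 334, 365] : List Int) := PySem.List.sorted_id_eq_of_perm_of_pairwise _ _ (insert_perm [0, 30, 61, 91, 122, 153, 183] [214, 244, 275, 306, 334, 365] date) (by simp [List.pairwise_cons]; omega)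
    simp only [find_month_firstday, find_month_firstday_alt]
    rw [hs]
    simp [aLoop, altLoop, List.getD, PySem.List.pyGet?, PySem.List.pyIdx?, (show (214:Int) ≠ date from by omega), (show ¬ date < (183:Int) from by omega), (show date < 306 from by omega), (show date < 244 from by omega), (show date < 214 from by omega)]
  by_cases h8 : date < 244
  · have hs : PySem.List.sorted (([0, 30, 61, 91, 122, 153, 183, 214, 244, 275, 306, 334, 365] : List Int) ++ [date]) (fun x => x) false = ([0, 30, 61, 91, 122, 153, 183, 214, date, 244, 275, 306, 334, 365] : List Int) := PySem.List.sorted_id_eq_of_perm_of_pairwise _ _ (insert_perm [0, 30, 61, 91, 122, 153, 183, 214] [244, 275, 306, 334, 365] date) (by simp [List.pairwise_cons]; omega)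
    simp only [find_month_firstday, find_month_firstday_alt]
    rw [hs]
    simp [aLoop, altLoop, List.getD, PySem.List.pyGet?, PySem.List.pyIdx?, (show (244:Int) ≠ date from by omega), (show ¬ date < (183:Int) from by omega), (show date < 306 from by omega), (show date < 244 from by omega), (show ¬ date < (214:Int) from by omega)]
  by_cases h9 : date < 275
  · have hs : PySem.List.sorted (([0, 30, 61, 91, 122, 153, 183, 214, 244, 275, 306, 334, 365] : List Int) ++ [date]) (fun x => x) false = ([0, 30, 61, 91, 122, 153, 183, 214, 244, date, 275, 306, 334, 365] : List Int) := PySem.List.sorted_id_eq_of_perm_of_pairwise _ _ (insert_perm [0, 30, 61, 91, 122, 153, 183, 214, 244] [275, 306, 334, 365] date) (by simp [List.pairwise_cons]; omega)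
    simp only [find_month_firstday, find_month_firstday_alt]
    rw [hs]
    simp [aLoop, altLoop, List.getD, PySem.List.pyGet?, PySem.List.pyIdx?, (show (275:Int) ≠ date from by omega), (show ¬ date < (183:Int) from by omega), (show date < 306 from by omega), (show ¬ date < (244:Int) from by omega), (show date < 275 from by omega)]
  by_cases h10 : date < 306
  · have hs : PySem.List.sorted (([0, 30, 61, 91, 122, 153, 183, 214, 244, 275, 306, 334, 365] : List Int) ++ [date]) (fun x => x) false = ([0, 30, 61, 91, 122, 153, 183, 214, 244, 275, date, 306, 334, 365] : List Int) := PySem.List.sorted_id_eq_of_perm_of_pairwise _ _ (insert_perm [0, 30, 61, 91, 122, 153, 183, 214, 244, 275] [306, 334, 365] date) (by simp [List.pairwise_cons]; omega)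
    simp only [find_month_firstday, find_month_firstday_alt]
    rw [hs]
    simp [aLoop, altLoop, List.getD, PySem.List.pyGet?, PySem.List.pyIdx?, (show (306:Int) ≠ date from by omega), (show ¬ date < (183:Int) from by omega), (show date < 306 from by omega), (show ¬ date < (244:Int) from by omega), (show ¬ date < (275:Int) from by omega)]
  by_cases h11 : date < 334
  · have hs : PySem.List.sorted (([0, 30, 61, 91, 122, 153, 183, 214, 244, 275, 306, 334, 365] : List Int) ++ [date]) (fun x => x) false = ([0, 30, 61, 91, 122, 153, 183, 214, 244, 275, 306, date, 334, 365] : List Int) := PySem.List.sorted_id_eq_of_perm_of_pairwise _ _ (insert_perm [0, 30, 61, 91, 122, 153, 183, 214, 244, 275, 306] [334, 365] date) (by simp [List.pairwise_cons]; omega)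
    simp only [find_month_firstday, find_month_firstday_alt]
    rw [hs]
    simp [aLoop, altLoop, List.getD, PySem.List.pyGet?, PySem.List.pyIdx?, (show (334:Int) ≠ date from by omega), (show ¬ date < (183:Int) from by omega), (show ¬ date < (306:Int) from by omega), (show date < 365 from by omega), (show date < 334 from by omega)]
  by_cases h12 : date < 365
  · have hs : PySem.List.sorted (([0, 30, 61, 91, 122, 153, 183, 214, 244, 275, 306, 334, 365] : List Int) ++ [date]) (fun x => x) false = ([0, 30, 61, 91, 122, 153, 183, 214, 244, 275, 306, 334, date, 365] : List Int) := PySem.List.sorted_id_eq_of_perm_of_pairwise _ _ (insert_perm [0, 30, 61, 91, 122, 153, 183, 214, 244, 275, 306, 334] [365] date) (by simp [List.pairwise_cons]; omega)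
    simp only [find_month_firstday, find_month_firstday_alt]
    rw [hs]
    simp [aLoop, altLoop, List.getD, PySem.List.pyGet?, PySem.List.pyIdx?, (show (365:Int) ≠ date from by omega), (show ¬ date < (183:Int) from by omega), (show ¬ date < (306:Int) from by omega), (show date < 365 from by omega), (show ¬ date < (334:Int) from by omega)]
  · have hs : PySem.List.sorted (([0, 30, 61, 91, 122, 153, 183, 214, 244, 275, 306, 334, 365] : List Int) ++ [date]) (fun x => x) false = ([0, 30, 61, 91, 122, 153, 183, 214, 244, 275, 306, 334, 365, date] : List Int) := PySem.List.sorted_id_eq_of_perm_of_pairwise _ _ (insert_perm [0, 30, 61, 91, 122, 153, 183, 214, 244, 275, 306, 334, 365] [] date) (by simp [List.pairwise_cons]; omega)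
    simp only [find_month_firstday, find_month_firstday_alt]
    rw [hs]
    simp [aLoop, altLoop, List.getD, PySem.List.pyGet?, PySem.List.pyIdx?, (show ¬ date < (183:Int) from by omega), (show ¬ date < (306:Int) from by omega), (show ¬ date < (365:Int) from by omega)]

-- ===== VERDICT (by name: the statement is the Claim_ definition above) =====
theorem find_month_firstday_spec : Claim_equal_find_month_firstday := by
  intro date _
  exact find_month_firstday_main_eq date
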